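-- pv_equiv track=rewrite | github.com/rodcoelho/python-practice | archived_problems/google_generate_binary_string.py | get_binary_poss
-- ===== SOURCE A (Python) =====
-- import itertools
--
-- def get_binary_poss(s):
--     slist = list(s)
--     output = []
--     count = s.count('?')
--     chars = '01'
--     for item in itertools.product(chars, repeat=count):
--         new_list = []
--         tmp = list("".join(item))
--         for ele in slist:
--             if ele == '?':
--                 new_list.append(tmp.pop(0))
--             else:
--                 new_list.append(ele)
--         output.append(''.join(new_list))
--
--     return output
-- ===== SOURCE B (Python) =====
-- def get_binary_poss(s):
--     parts = ['']
--     for c in s: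
--         if c == '?':
--             parts = [p + b for p in parts for b in '01']
--         else:
--             parts = [p + c for p in parts]
--     return parts
-- ===== Notes on version B (the rewrite author's own statement) =====
-- stated objective: simpler
-- what changed: Replaced the build-all-bit-tuples-then-substitute scheme (itertools.product over the wildcard count plus a full rescan of the string with pop(0) per tuple) by a single left-to-right pass that maintains the list of partial expansions, doubling it at each wildcard.
import Mathlib
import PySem

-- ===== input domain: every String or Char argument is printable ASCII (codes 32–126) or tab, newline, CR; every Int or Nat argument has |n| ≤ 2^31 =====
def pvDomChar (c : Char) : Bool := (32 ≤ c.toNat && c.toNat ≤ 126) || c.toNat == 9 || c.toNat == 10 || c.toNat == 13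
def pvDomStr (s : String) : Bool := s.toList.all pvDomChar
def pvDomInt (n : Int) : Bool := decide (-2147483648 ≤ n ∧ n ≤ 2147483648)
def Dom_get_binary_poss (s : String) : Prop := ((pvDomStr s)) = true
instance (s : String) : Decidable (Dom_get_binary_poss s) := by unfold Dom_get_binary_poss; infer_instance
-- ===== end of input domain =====

-- B replaces A's "enumerate all bit tuples with itertools.product, then substitute each into the
-- string with pop(0)" by one recursive walk over the string branching at each '?'.

-- ===== PORT A =====
-- itertools.product('01', repeat=n): first coordinate varies slowest
def pvProdA : Nat → List (List Char)
  | 0 => [[]]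
  | n + 1 => ['0', '1'].flatMap (fun c => (pvProdA n).map (fun t => c :: t))

-- the inner for-loop over slist: substitute '?' by tmp.pop(0)
-- (the tmp = [] branch under '?' is unreachable: tmp always carries exactly count('?') chars;
--  Python would raise IndexError there)
def pvSubstA : List Char → List Char → List Char
  | [], _ => []
  | e :: rest, tmp =>
    if e = '?' then
      match tmp with
      | t :: ts => t :: pvSubstA rest ts
      | [] => []
    else e :: pvSubstA rest tmp

def get_binary_poss (s : String) : List String :=
  let slist := s.toList
  let count := PySem.Str.count s "?"
  (pvProdA count).foldl (fun output item => output ++ [String.ofList (pvSubstA slist item)]) []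

-- ===== PORT B =====
-- the loop body of Source B: expand the current list of partial results by one character
def pvStepB (parts : List (List Char)) (c : Char) : List (List Char) :=
  if c = '?' then parts.flatMap (fun p => [p ++ ['0'], p ++ ['1']])
  else parts.map (fun p => p ++ [c])

-- strings are carried as List Char during the pass and materialised at the end
def get_binary_poss_alt (s : String) : List String :=
  (s.toList.foldl pvStepB [[]]).map String.ofList

-- ===== PRECONDITION & SPEC =====
def Spec_get_binary_poss (s : String) (out : List String) : Prop := out = get_binary_poss_alt s
instance (s : String) (out : List String) : Decidable (Spec_get_binary_poss s out) := by unfold Spec_get_binary_poss; infer_instance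

-- ===== CLAIM (what is proved, stated in full; the proofs are below) =====
def Claim_equal_get_binary_poss : Prop := ∀ (s : String), Dom_get_binary_poss s → Spec_get_binary_poss s (get_binary_poss s)

-- ===== LEMMAS AND PROOFS =====

lemma pv_foldl_snoc (f : List Char → String) :
    ∀ (l : List (List Char)) (acc : List String),
      l.foldl (fun o i => o ++ [f i]) acc = acc ++ l.map f := by
  intro l
  induction l with
  | nil => simp
  | cons x xs ih => intro acc; simp [List.foldl, ih]

lemma pv_count_go_single (c : Char) :
    ∀ (l : List Char) (fuel acc : Nat), l.length ≤ fuel →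
      PySem.Chars.count.go [c] fuel l acc = acc + l.count c := by
  intro l
  induction l with
  | nil =>
      intro fuel acc _
      cases fuel <;> simp [PySem.Chars.count.go]
  | cons h t ih =>
      intro fuel acc hle
      cases fuel with
      | zero => simp at hle
      | succ n =>
          have hlt : t.length ≤ n := by simpa using hle
          by_cases hc : c = h
          · subst hc
            rw [show PySem.Chars.count.go [c] (n + 1) (c :: t) acc
                  = PySem.Chars.count.go [c] n t (acc + 1) from by
                  simp [PySem.Chars.count.go, List.isPrefixOf]]
            rw [ih n (acc + 1) hlt, List.count_cons_self]
            omega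
          · rw [show PySem.Chars.count.go [c] (n + 1) (h :: t) acc
                  = PySem.Chars.count.go [c] n t acc from by
                  simp [PySem.Chars.count.go, List.isPrefixOf, hc]]
            rw [ih n acc hlt]
            simp [Ne.symm hc]

lemma pv_count_single (l : List Char) (c : Char) :
    PySem.Chars.count l [c] = l.count c := by
  simp [PySem.Chars.count, pv_count_go_single c l l.length 0 (le_refl _)]

lemma pv_foldlB_eq :
    ∀ (l : List Char) (parts : List (List Char)),
      l.foldl pvStepB parts =
        parts.flatMap (fun p =>
          (pvProdA (l.count '?')).map (fun item => p ++ pvSubstA l item)) := by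
  intro l
  induction l with
  | nil =>
      intro parts
      simp [pvProdA, pvSubstA]
  | cons c rest ih =>
      intro parts
      rw [List.foldl_cons, ih]
      by_cases hc : c = '?'
      · subst hc
        rw [show pvStepB parts '?' = parts.flatMap (fun p => [p ++ ['0'], p ++ ['1']]) from by
              simp [pvStepB],
            List.flatMap_assoc,
            show List.count '?' ('?' :: rest) = List.count '?' rest + 1 from
              List.count_cons_self]
        congr 1
        funext p
        simp only [pvProdA, List.flatMap_cons, List.flatMap_nil, List.map_append,
          List.map_map, List.append_nil]
        congr 1 <;> exact List.map_congr_left (fun item _ => by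
          simp [pvSubstA, List.append_assoc])
      · rw [show pvStepB parts c = parts.map (fun p => p ++ [c]) from by simp [pvStepB, hc],
            List.flatMap_map,
            show List.count '?' (c :: rest) = List.count '?' rest from by
              simp [hc]]
        congr 1
        funext p
        simp [pvSubstA, hc, List.append_assoc]

-- ===== VERDICT (by name: the statement is the Claim_ definition above) =====
theorem get_binary_poss_spec : Claim_equal_get_binary_poss := by
  intro s _
  show get_binary_poss s = get_binary_poss_alt s
  unfold get_binary_poss get_binary_poss_alt
  rw [PySem.Str.count_eq]
  show (pvProdA (PySem.Chars.count s.toList ['?'])).foldl _ [] = _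
  rw [pv_count_single, pv_foldl_snoc, pv_foldlB_eq]
  simp [List.map_map, Function.comp]
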